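-- pv_equiv track=rewrite | github.com/Kefab/HackerRank | Problem Solving/GradingStudents.py | gradingStudents
-- ===== SOURCE A (Python) =====
-- def gradingStudents(grades):
--     newgrades = []
--     for grade in grades:
--         if(grade > 37):
--             aux = grade
--             while(aux%5!=0):
--                 aux+=1
--             if(aux-grade>=3):
--                 newgrades.append(grade)
--             else:
--                 newgrades.append(aux)
--         else:
--             newgrades.append(grade)
--     return newgrades;
-- ===== SOURCE B (Python) =====
-- def gradingStudents(grades):
--     def rnd(g):
--         if g <= 37:
--             return g
--         d = (-g) % 5  # distance to next multiple of 5
--         return g + d if d < 3 else g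
--     return [rnd(g) for g in grades]
-- ===== Notes on version B (the rewrite author's own statement) =====
-- stated objective: simpler
-- what changed: Replaced the incremental while-loop search for the next multiple of 5 with the closed-form modular distance (-g) % 5, and the append-accumulator loop with a per-element function mapped over the list.
import Mathlib
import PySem

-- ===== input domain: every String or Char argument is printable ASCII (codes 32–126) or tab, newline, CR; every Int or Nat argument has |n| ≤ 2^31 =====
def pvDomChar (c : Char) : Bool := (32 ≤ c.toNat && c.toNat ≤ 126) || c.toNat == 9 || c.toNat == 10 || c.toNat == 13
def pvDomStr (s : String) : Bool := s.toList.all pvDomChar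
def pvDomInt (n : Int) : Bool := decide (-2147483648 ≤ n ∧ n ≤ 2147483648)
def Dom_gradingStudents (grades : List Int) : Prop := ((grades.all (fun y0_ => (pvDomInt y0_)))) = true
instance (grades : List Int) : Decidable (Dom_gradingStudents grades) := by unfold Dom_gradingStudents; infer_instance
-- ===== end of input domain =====

-- B replaces A's incremental while-search for the next multiple of 5 with the
-- closed form (-g) % 5 and builds the result by mapping one function (objective: simpler).

-- ===== PORT A =====
-- the inner 'while aux % 5 != 0: aux += 1', with structural fuel; fuel 5 always
-- suffices because Python's mod (positive divisor) lies in [0,5), so at most 4 increments occur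
def pvWhileAux (fuel : Nat) (aux : Int) : Int :=
  match fuel with
  | 0 => aux
  | f + 1 => if PySem.Int.mod aux 5 ≠ 0 then pvWhileAux f (aux + 1) else aux

def gradingStudents (grades : List Int) : List Int :=
  grades.foldl (fun newgrades grade =>
    if grade > 37 then
      let aux := pvWhileAux 5 grade
      if aux - grade ≥ 3 then newgrades ++ [grade] else newgrades ++ [aux]
    else newgrades ++ [grade]) []

-- ===== PORT B =====
def pvRnd (g : Int) : Int :=
  if g ≤ 37 then g
  else
    let d := PySem.Int.mod (-g) 5
    if d < 3 then g + d else g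

def gradingStudents_alt (grades : List Int) : List Int := grades.map pvRnd

-- ===== PRECONDITION & SPEC =====
def Spec_gradingStudents (grades : List Int) (out : List Int) : Prop := out = gradingStudents_alt grades
instance (grades : List Int) (out : List Int) : Decidable (Spec_gradingStudents grades out) := by unfold Spec_gradingStudents; infer_instance

-- ===== CLAIM (what is proved, stated in full; the proofs are below) =====
def Claim_equal_gradingStudents : Prop := ∀ (grades : List Int), Dom_gradingStudents grades → Spec_gradingStudents grades (gradingStudents grades)

-- ===== LEMMAS AND PROOFS =====

-- with enough fuel the loop returns the least multiple of 5 that is ≥ aux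
theorem pvWhileAux_fuel (f : Nat) (aux : Int) (hf : ((5 - aux % 5) % 5).toNat ≤ f) :
    PySem.Int.mod (pvWhileAux f aux) 5 = 0 ∧ aux ≤ pvWhileAux f aux ∧ pvWhileAux f aux < aux + 5 := by
  induction f generalizing aux with
  | zero =>
    simp only [pvWhileAux]
    have h0 : aux % 5 = 0 := by omega
    exact ⟨by rw [PySem.Int.mod_eq_emod_of_pos (by omega)]; exact h0, le_refl _, by omega⟩
  | succ f ih =>
    simp only [pvWhileAux]
    have hm0 : PySem.Int.mod aux 5 = aux % 5 := PySem.Int.mod_eq_emod_of_pos (by omega)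
    by_cases h : aux % 5 = 0
    · rw [if_neg (by rw [hm0]; simpa using h)]
      exact ⟨by rw [hm0]; exact h, le_refl _, by omega⟩
    · rw [if_pos (by rw [hm0]; simpa using h)]
      obtain ⟨i1, i2, i3⟩ := ih (aux + 1) (by omega)
      have hm : PySem.Int.mod (pvWhileAux f (aux + 1)) 5 = (pvWhileAux f (aux + 1)) % 5 :=
        PySem.Int.mod_eq_emod_of_pos (by omega)
      rw [hm] at i1
      exact ⟨by rw [hm]; exact i1, by omega, by omega⟩

theorem pvWhileAux_spec (aux : Int) :
    PySem.Int.mod (pvWhileAux 5 aux) 5 = 0 ∧ aux ≤ pvWhileAux 5 aux ∧ pvWhileAux 5 aux < aux + 5 :=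
  pvWhileAux_fuel 5 aux (by omega)

-- per-element agreement: one step of A's loop body appends exactly pvRnd g
theorem step_eq (g : Int) :
    (if g > 37 then
      if pvWhileAux 5 g - g ≥ 3 then g else pvWhileAux 5 g
     else g) = pvRnd g := by
  unfold pvRnd
  by_cases hg : g > 37
  · obtain ⟨h0, h1, h2⟩ := pvWhileAux_spec g
    have hm : PySem.Int.mod (pvWhileAux 5 g) 5 = (pvWhileAux 5 g) % 5 :=
      PySem.Int.mod_eq_emod_of_pos (by omega)
    have hd : PySem.Int.mod (-g) 5 = (-g) % 5 := PySem.Int.mod_eq_emod_of_pos (by omega)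
    rw [hm] at h0
    rw [hd]
    have hw : pvWhileAux 5 g = g + (-g) % 5 := by omega
    simp only [hg, if_true, if_neg (by omega : ¬ g ≤ 37), hw]
    split_ifs <;> omega
  · simp [hg, show g ≤ 37 by omega]

theorem foldl_append_map (grades : List Int) (acc : List Int) :
    grades.foldl (fun newgrades grade =>
      if grade > 37 then
        let aux := pvWhileAux 5 grade
        if aux - grade ≥ 3 then newgrades ++ [grade] else newgrades ++ [aux]
      else newgrades ++ [grade]) acc = acc ++ grades.map pvRnd := by
  induction grades generalizing acc with
  | nil => simp
  | cons g gs ih =>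
    have hstep : (if g > 37 then
        let aux := pvWhileAux 5 g
        if aux - g ≥ 3 then acc ++ [g] else acc ++ [aux]
      else acc ++ [g]) = acc ++ [pvRnd g] := by
      rw [← step_eq g]
      by_cases h37 : g > 37 <;> by_cases hd : pvWhileAux 5 g - g ≥ 3 <;> simp [h37, hd]
    rw [List.foldl_cons, ih, hstep, List.map_cons, List.append_assoc]
    rfl

-- ===== VERDICT (by name: the statement is the Claim_ definition above) =====
theorem gradingStudents_spec : Claim_equal_gradingStudents := by
  intro grades _
  unfold Spec_gradingStudents gradingStudents gradingStudents_alt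
  exact (foldl_append_map grades []).trans (List.nil_append _)
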